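-- pv_equiv track=rewrite | github.com/grooveai-dev/groove-signal | src/relay/scheduler.py | validate_coverage
-- ===== SOURCE A (Python) =====
-- MODEL_REGISTRY: dict[str, dict] = {
--     "Qwen/Qwen3-4B": {
--         "total_layers": 36,
--         "hidden_size": 2560,
--         "num_heads": 32,
--         "vocab_size": 151936,
--         "memory_per_layer_mb": 220,
--         "dtype": "bfloat16",
--     },
--     "Qwen/Qwen2.5-0.5B": {
--         "total_layers": 24,
--         "hidden_size": 896,
--         "num_heads": 14,
--         "vocab_size": 151936,
--         "memory_per_layer_mb": 50,
--         "dtype": "float16",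
--     },
-- }
--
-- def get_model_info(model_name: str) -> dict:
--     """Return the registry entry for a model, or raise ValueError."""
--     if model_name not in MODEL_REGISTRY:
--         raise ValueError(f"Unknown model: {model_name!r}")
--     return MODEL_REGISTRY[model_name]
--
-- def validate_coverage(
--     assignments: dict[str, tuple[int, int]],
--     model_name: str,
-- ) -> bool:
--     """Check assignments tile [0, total_layers) with no gaps or overlaps."""
--     info = get_model_info(model_name)
--     total_layers: int = info["total_layers"]
--     if not assignments:
--         return False
--     spans = sorted(assignments.values(), key=lambda s: s[0])
--     if spans[0][0] != 0:
--         return False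
--     if spans[-1][1] != total_layers:
--         return False
--     for i in range(len(spans) - 1):
--         if spans[i][1] != spans[i + 1][0]:
--             return False
--     for start, end in spans:
--         if end <= start:
--             return False
--     return True
-- ===== SOURCE B (Python) =====
-- MODEL_REGISTRY: dict[str, dict] = {
--     "Qwen/Qwen3-4B": {
--         "total_layers": 36,
--         "hidden_size": 2560,
--         "num_heads": 32,
--         "vocab_size": 151936,
--         "memory_per_layer_mb": 220,
--         "dtype": "bfloat16",
--     },
--     "Qwen/Qwen2.5-0.5B": {
--         "total_layers": 24,
--         "hidden_size": 896,
--         "num_heads": 14,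
--         "vocab_size": 151936,
--         "memory_per_layer_mb": 50,
--         "dtype": "float16",
--     },
-- }
--
-- def get_model_info(model_name: str) -> dict:
--     """Return the registry entry for a model, or raise ValueError."""
--     if model_name not in MODEL_REGISTRY:
--         raise ValueError(f"Unknown model: {model_name!r}")
--     return MODEL_REGISTRY[model_name]
--
-- def validate_coverage(
--     assignments: dict[str, tuple[int, int]],
--     model_name: str,
-- ) -> bool:
--     """Check assignments tile [0, total_layers) with no gaps or overlaps."""
--     info = get_model_info(model_name)
--     total_layers: int = info["total_layers"]
--     if not assignments:
--         return False
--     covered = [False] * total_layers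
--     for start, end in assignments.values():
--         if end <= start:
--             return False
--         for layer in range(start, end):
--             if layer < 0 or layer >= total_layers or covered[layer]:
--                 return False
--             covered[layer] = True
--     return all(covered)
-- ===== Notes on version B (the rewrite author's own statement) =====
-- stated objective: alternative
-- what changed: Replaces sort-then-scan (sort spans by start, check first/last endpoints and pairwise adjacency) with a single unsorted pass that marks each layer in a boolean coverage array, rejecting out-of-range or doubly-covered layers, and finally checks every layer is marked.
import Mathlib
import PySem

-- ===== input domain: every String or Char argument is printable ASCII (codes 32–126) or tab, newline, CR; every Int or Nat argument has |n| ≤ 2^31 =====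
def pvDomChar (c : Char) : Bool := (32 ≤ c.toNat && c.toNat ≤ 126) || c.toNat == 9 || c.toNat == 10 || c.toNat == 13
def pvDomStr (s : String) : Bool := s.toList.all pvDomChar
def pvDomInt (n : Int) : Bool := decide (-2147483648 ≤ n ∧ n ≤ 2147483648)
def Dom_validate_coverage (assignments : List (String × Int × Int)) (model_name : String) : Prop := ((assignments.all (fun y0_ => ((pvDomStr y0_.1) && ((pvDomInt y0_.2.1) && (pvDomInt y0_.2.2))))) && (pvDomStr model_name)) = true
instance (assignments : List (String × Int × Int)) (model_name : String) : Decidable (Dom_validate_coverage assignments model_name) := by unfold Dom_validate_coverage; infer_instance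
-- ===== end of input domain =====

-- B replaces A's sort-then-scan adjacency check by one unsorted marking pass over a boolean
-- coverage array plus a final all-marked check (objective: alternative algorithm, similar cost).

-- ===== PORT A =====
-- MODEL_REGISTRY; the "dtype" field (a string, never read by validate_coverage) is omitted so the
-- inner dict is typed String → Int.
def pvRegistry : PySem.Dict String (PySem.Dict String Int) :=
  PySem.Dict.ofList
    [("Qwen/Qwen3-4B", PySem.Dict.ofList
        [("total_layers", 36), ("hidden_size", 2560), ("num_heads", 32),
         ("vocab_size", 151936), ("memory_per_layer_mb", 220)]),
     ("Qwen/Qwen2.5-0.5B", PySem.Dict.ofList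
        [("total_layers", 24), ("hidden_size", 896), ("num_heads", 14),
         ("vocab_size", 151936), ("memory_per_layer_mb", 50)])]

-- get_model_info: none = the ValueError branch (excluded by Pre_).
def getModelInfo? (model_name : String) : Option (PySem.Dict String Int) :=
  PySem.Dict.get? pvRegistry model_name

-- the 'for i in range(len(spans) - 1): if spans[i][1] != spans[i+1][0]' loop
def aChain : List (Int × Int) → Bool
  | p :: q :: rest => (p.2 == q.1) && aChain (q :: rest)
  | _ => true

-- body of A after 'total_layers' and the empty check, over spans = assignments.values()
def aCheck (total_layers : Int) (vs : List (Int × Int)) : Bool :=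
  let spans := PySem.List.sorted vs (fun s => s.1) false
  match PySem.List.pyGet? spans 0, PySem.List.pyGet? spans (-1) with
  | some s0, some sl =>
      if s0.1 != 0 then false
      else if sl.2 != total_layers then false
      else if !aChain spans then false
      else spans.all (fun p => !(decide (p.2 ≤ p.1)))   -- the final 'if end <= start' loop
  | _, _ => false      -- unreachable: spans is nonempty when this is evaluated

def validate_coverage (assignments : List (String × Int × Int)) (model_name : String) : Bool :=
  match getModelInfo? model_name with
  | none => false   -- get_model_info raises ValueError here: excluded by Pre_
  | some info =>
      let total_layers := PySem.Dict.getD info "total_layers" 0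
      if assignments.isEmpty then false
      else aCheck total_layers (PySem.Dict.values (PySem.Dict.ofList assignments))

-- ===== PORT B =====
-- 'for layer in range(start, end): …' marking loop; none = an early 'return False'
def bMark (total : Int) (s e : Int) (covered : List Bool) : Option (List Bool) :=
  if s < e then
    if s < 0 || total ≤ s || covered.getD s.toNat false then none
    else bMark total (s + 1) e (covered.set s.toNat true)
  else some covered
termination_by (e - s).toNat
decreasing_by omega

-- 'for start, end in assignments.values(): …'
def bMarkAll (total : Int) : List (Int × Int) → List Bool → Option (List Bool)
  | [], covered => some covered
  | (s, e) :: rest, covered =>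
      if e ≤ s then none
      else
        match bMark total s e covered with
        | none => none
        | some covered' => bMarkAll total rest covered'

-- body of B after 'total_layers' and the empty check
def bCheck (total_layers : Int) (vs : List (Int × Int)) : Bool :=
  match bMarkAll total_layers vs (List.replicate total_layers.toNat false) with
  | none => false
  | some covered => covered.all (fun b => b)   -- all(covered)

def validate_coverage_alt (assignments : List (String × Int × Int)) (model_name : String) : Bool :=
  match getModelInfo? model_name with
  | none => false   -- get_model_info raises ValueError here: excluded by Pre_
  | some info =>
      let total_layers := PySem.Dict.getD info "total_layers" 0
      if assignments.isEmpty then false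
      else bCheck total_layers (PySem.Dict.values (PySem.Dict.ofList assignments))

-- ===== PRECONDITION & SPEC =====
-- Pre_ excludes exactly the model names outside MODEL_REGISTRY, on which A raises ValueError.
def Pre_validate_coverage (_assignments : List (String × Int × Int)) (model_name : String) : Prop :=
  model_name = "Qwen/Qwen3-4B" ∨ model_name = "Qwen/Qwen2.5-0.5B"
instance (assignments : List (String × Int × Int)) (model_name : String) : Decidable (Pre_validate_coverage assignments model_name) := by unfold Pre_validate_coverage; infer_instance

def pvWitness_validate_coverage : (List (String × Int × Int)) × String :=
  ([("a", 0, 20), ("b", 20, 36)], "Qwen/Qwen3-4B")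

def Spec_validate_coverage (assignments : List (String × Int × Int)) (model_name : String) (out : Bool) : Prop := out = validate_coverage_alt assignments model_name
instance (assignments : List (String × Int × Int)) (model_name : String) (out : Bool) : Decidable (Spec_validate_coverage assignments model_name out) := by unfold Spec_validate_coverage; infer_instance

-- ===== CLAIM (what is proved, stated in full; the proofs are below) =====
def Claim_equal_validate_coverage : Prop := ∀ (assignments : List (String × Int × Int)) (model_name : String), Dom_validate_coverage assignments model_name → Pre_validate_coverage assignments model_name → Spec_validate_coverage assignments model_name (validate_coverage assignments model_name)

-- ===== LEMMAS AND PROOFS =====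

-- The common mathematical content: vs tiles [0, total) exactly, stated pointwise.
def CoversPt (total : Int) (vs : List (Int × Int)) : Prop :=
  (∀ p ∈ vs, p.1 < p.2) ∧
  (∀ p ∈ vs, ∀ x : Int, p.1 ≤ x → x < p.2 → 0 ≤ x ∧ x < total) ∧
  List.Pairwise (fun p q : Int × Int => ∀ x : Int, p.1 ≤ x → x < p.2 → ¬(q.1 ≤ x ∧ x < q.2)) vs ∧
  (∀ x : Int, 0 ≤ x → x < total → ∃ p ∈ vs, p.1 ≤ x ∧ x < p.2)

-- the chain property that A's head/last/adjacency checks amount to on the sorted list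
def ChainTo (a total : Int) : List (Int × Int) → Prop
  | [] => a = total
  | p :: rest => p.1 = a ∧ ChainTo p.2 total rest

theorem getD_set_ne (c : List Bool) {n i : Nat} (h : n ≠ i) (b : Bool) :
    (c.set n b).getD i false = c.getD i false := by
  simp [List.getD, List.getElem?_set, h]

theorem getD_set_self (c : List Bool) {n : Nat} (h : n < c.length) (b : Bool) :
    (c.set n b).getD n false = b := by
  simp [List.getD, List.getElem?_set, h]

theorem bMark_isSome (total s e : Int) (c : List Bool) :
    (bMark total s e c).isSome = true ↔
      ∀ x : Int, s ≤ x → x < e → 0 ≤ x ∧ x < total ∧ c.getD x.toNat false = false := by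
  induction s, c using bMark.induct (total := total) (e := e) with
  | case1 s c hlt hbad =>
      rw [bMark, if_pos hlt, if_pos hbad]
      simp only [Option.isSome_none, Bool.false_eq_true, false_iff]
      intro hall
      obtain ⟨h0, h1, h2⟩ := hall s le_rfl hlt
      simp only [Bool.or_eq_true, decide_eq_true_eq] at hbad
      rcases hbad with (h | h) | h <;> [omega; omega; (rw [h] at h2; cases h2)]
  | case2 s c hlt hbad ih =>
      rw [bMark, if_pos hlt, if_neg hbad]
      simp only [Bool.or_eq_true, decide_eq_true_eq, not_or, Bool.not_eq_true] at hbad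
      obtain ⟨⟨hs0, hst⟩, hc⟩ := hbad
      rw [ih]
      constructor
      · intro hall x hx1 hx2
        rcases eq_or_lt_of_le hx1 with rfl | hgt
        · exact ⟨by omega, by omega, hc⟩
        · obtain ⟨a1, a2, a3⟩ := hall x (by omega) hx2
          rw [getD_set_ne c (show s.toNat ≠ x.toNat by omega)] at a3
          exact ⟨a1, a2, a3⟩
      · intro hall x hx1 hx2
        obtain ⟨a1, a2, a3⟩ := hall x (by omega) hx2
        exact ⟨a1, a2, by rw [getD_set_ne c (show s.toNat ≠ x.toNat by omega)]; exact a3⟩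
  | case3 s c hge =>
      rw [bMark, if_neg hge]
      simp only [Option.isSome_some, true_iff]
      intro x hx1 hx2; omega

theorem bMark_length {total s e : Int} {c c' : List Bool}
    (h : bMark total s e c = some c') : c'.length = c.length := by
  induction s, c using bMark.induct (total := total) (e := e) with
  | case1 s c hlt hbad => rw [bMark, if_pos hlt, if_pos hbad] at h; cases h
  | case2 s c hlt hbad ih =>
      rw [bMark, if_pos hlt, if_neg hbad] at h
      simpa using ih h
  | case3 s c hge => rw [bMark, if_neg hge] at h; cases h; rfl

theorem bMark_getD {total s e : Int} {c c' : List Bool}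
    (hlen : total.toNat ≤ c.length)
    (h : bMark total s e c = some c') (i : Nat) :
    c'.getD i false = (c.getD i false || decide (s ≤ (i : Int) ∧ (i : Int) < e)) := by
  induction s, c using bMark.induct (total := total) (e := e) with
  | case1 s c hlt hbad => rw [bMark, if_pos hlt, if_pos hbad] at h; cases h
  | case2 s c hlt hbad ih =>
      rw [bMark, if_pos hlt, if_neg hbad] at h
      simp only [Bool.or_eq_true, decide_eq_true_eq, not_or, Bool.not_eq_true] at hbad
      obtain ⟨⟨hs0, hst⟩, hc⟩ := hbad
      have := ih (by simpa using hlen) h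
      rw [this]
      by_cases hi : s.toNat = i
      · subst hi
        rw [getD_set_self c (by omega)]
        have h1 : decide (s ≤ (s.toNat : Int) ∧ (s.toNat : Int) < e) = true := by
          simp only [decide_eq_true_eq]; omega
        rw [h1]; simp
      · rw [getD_set_ne c hi]
        congr 1
        simp only [decide_eq_decide]
        omega
  | case3 s c hge =>
      rw [bMark, if_neg hge] at h; cases h
      have : decide (s ≤ (i : Int) ∧ (i : Int) < e) = false := by
        simp only [decide_eq_false_iff_not]; omega
      rw [this]; simp

theorem bMarkAll_length {total : Int} {vs : List (Int × Int)} {c c' : List Bool}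
    (h : bMarkAll total vs c = some c') : c'.length = c.length := by
  induction vs generalizing c with
  | nil => cases h; rfl
  | cons p rest ih =>
      obtain ⟨s, e⟩ := p
      rw [bMarkAll] at h
      split at h
      · cases h
      · rename_i hse
        cases hm : bMark total s e c with
        | none => rw [hm] at h; cases h
        | some c1 => rw [hm] at h; rw [ih h, bMark_length hm]

theorem bMarkAll_isSome (total : Int) (vs : List (Int × Int)) (c : List Bool)
    (hlen : total.toNat ≤ c.length) :
    (bMarkAll total vs c).isSome = true ↔
      (∀ p ∈ vs, p.1 < p.2) ∧
      (∀ p ∈ vs, ∀ x : Int, p.1 ≤ x → x < p.2 →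
          0 ≤ x ∧ x < total ∧ c.getD x.toNat false = false) ∧
      List.Pairwise (fun p q : Int × Int => ∀ x : Int, p.1 ≤ x → x < p.2 → ¬(q.1 ≤ x ∧ x < q.2)) vs := by
  induction vs generalizing c with
  | nil => simp [bMarkAll]
  | cons p rest ih =>
      obtain ⟨s, e⟩ := p
      rw [bMarkAll]
      by_cases hse : e ≤ s
      · rw [if_pos hse]
        simp only [Option.isSome_none, Bool.false_eq_true, false_iff]
        intro ⟨h1, _⟩
        have := h1 (s, e) (List.mem_cons_self ..)
        omega
      · rw [if_neg hse]
        cases hm : bMark total s e c with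
        | none =>
            simp only [Option.isSome_none, Bool.false_eq_true, false_iff]
            intro ⟨h1, h2, h3⟩
            have : (bMark total s e c).isSome = true := by
              rw [bMark_isSome]
              intro x hx1 hx2
              exact h2 (s, e) (List.mem_cons_self ..) x hx1 hx2
            rw [hm] at this; cases this
        | some c1 =>
            have hmm := hm
            have hhead : ∀ x : Int, s ≤ x → x < e → 0 ≤ x ∧ x < total ∧ c.getD x.toNat false = false := by
              have : (bMark total s e c).isSome = true := by rw [hm]; rfl
              rwa [bMark_isSome] at this
            have hlen1 : total.toNat ≤ c1.length := by rw [bMark_length hm]; exact hlen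
            rw [ih c1 hlen1]
            have hget := fun i => bMark_getD hlen hm i
            constructor
            · rintro ⟨h1, h2, h3⟩
              refine ⟨?_, ?_, ?_⟩
              · intro p hp
                rcases List.mem_cons.mp hp with rfl | hp'
                · exact not_le.mp hse
                · exact h1 p hp'
              · intro p hp x hx1 hx2
                rcases List.mem_cons.mp hp with rfl | hp'
                · exact hhead x hx1 hx2
                · obtain ⟨a1, a2, a3⟩ := h2 p hp' x hx1 hx2
                  refine ⟨a1, a2, ?_⟩
                  have := hget x.toNat
                  rw [a3] at this
                  replace this := this.symm
                  simp only [Bool.or_eq_false_iff, decide_eq_false_iff_not] at this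
                  exact this.1
              · refine List.Pairwise.cons ?_ h3
                intro q hq x hx1 hx2 hqx
                obtain ⟨a1, a2, a3⟩ := h2 q hq x hqx.1 hqx.2
                have := hget x.toNat
                rw [a3] at this
                replace this := this.symm
                simp only [Bool.or_eq_false_iff, decide_eq_false_iff_not] at this
                have := this.2
                rw [show ((x.toNat : Int)) = x by omega] at this
                exact this ⟨hx1, hx2⟩
            · rintro ⟨h1, h2, h3⟩
              have hdisj := List.pairwise_cons.mp h3
              refine ⟨?_, ?_, hdisj.2⟩
              · intro p hp; exact h1 p (List.mem_cons_of_mem _ hp)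
              · intro p hp x hx1 hx2
                obtain ⟨a1, a2, a3⟩ := h2 p (List.mem_cons_of_mem _ hp) x hx1 hx2
                refine ⟨a1, a2, ?_⟩
                rw [hget x.toNat, a3]
                have : ¬(s ≤ (x.toNat : Int) ∧ (x.toNat : Int) < e) := by
                  rw [show ((x.toNat : Int)) = x by omega]
                  exact fun hx => hdisj.1 p hp x hx.1 hx.2 ⟨hx1, hx2⟩
                simp only [Bool.false_or, decide_eq_false_iff_not]
                exact this

theorem bMarkAll_getD {total : Int} {vs : List (Int × Int)} {c c' : List Bool}
    (hlen : total.toNat ≤ c.length)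
    (h : bMarkAll total vs c = some c') (i : Nat) :
    c'.getD i false = (c.getD i false || decide (∃ p ∈ vs, p.1 ≤ (i : Int) ∧ (i : Int) < p.2)) := by
  induction vs generalizing c with
  | nil => cases h; simp
  | cons p rest ih =>
      obtain ⟨s, e⟩ := p
      rw [bMarkAll] at h
      split at h
      · cases h
      · cases hm : bMark total s e c with
        | none => rw [hm] at h; cases h
        | some c1 =>
            rw [hm] at h
            rw [ih (by rw [bMark_length hm]; exact hlen) h, bMark_getD hlen hm i]
            simp only [Bool.or_assoc]
            congr 1
            simp only [← Bool.decide_or, decide_eq_decide]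
            constructor
            · rintro (h' | ⟨p, hp, h'⟩)
              · exact ⟨(s, e), List.mem_cons_self .., h'⟩
              · exact ⟨p, List.mem_cons_of_mem _ hp, h'⟩
            · rintro ⟨p, hp, h'⟩
              rcases List.mem_cons.mp hp with rfl | hp'
              · exact Or.inl h'
              · exact Or.inr ⟨p, hp', h'⟩

theorem getD_replicate_false (n i : Nat) : (List.replicate n false).getD i false = false := by
  simp [List.getD, List.getElem?_replicate]
  split <;> rfl

theorem bCheck_iff (total : Int) (vs : List (Int × Int)) :
    bCheck total vs = true ↔ CoversPt total vs := by
  unfold bCheck CoversPt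
  have hlen : total.toNat ≤ (List.replicate total.toNat false).length := by simp
  cases hma : bMarkAll total vs (List.replicate total.toNat false) with
  | none =>
      simp only [Bool.false_eq_true, false_iff]
      rintro ⟨h1, h2, h3, h4⟩
      have : (bMarkAll total vs (List.replicate total.toNat false)).isSome = true := by
        rw [bMarkAll_isSome total vs _ hlen]
        exact ⟨h1, fun p hp x hx1 hx2 => ⟨(h2 p hp x hx1 hx2).1, (h2 p hp x hx1 hx2).2, getD_replicate_false _ _⟩, h3⟩
      rw [hma] at this; cases this
  | some c' =>
      have hsome : (bMarkAll total vs (List.replicate total.toNat false)).isSome = true := by rw [hma]; rfl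
      rw [bMarkAll_isSome total vs _ hlen] at hsome
      obtain ⟨h1, h2, h3⟩ := hsome
      have hlen' : c'.length = total.toNat := by rw [bMarkAll_length hma]; simp
      have hget := fun i => bMarkAll_getD hlen hma i
      constructor
      · intro hall
        refine ⟨h1, fun p hp x hx1 hx2 => ⟨(h2 p hp x hx1 hx2).1, (h2 p hp x hx1 hx2).2.1⟩, h3, ?_⟩
        intro x hx0 hxt
        have hi : x.toNat < c'.length := by omega
        have := List.all_eq_true.mp hall _ (List.getElem_mem hi)
        have hgd : c'.getD x.toNat false = true := by
          rw [List.getD, List.getElem?_eq_getElem hi]; exact this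
        rw [hget x.toNat, getD_replicate_false, Bool.false_or, decide_eq_true_eq] at hgd
        obtain ⟨p, hp, hx⟩ := hgd
        rw [show ((x.toNat : Int)) = x by omega] at hx
        exact ⟨p, hp, hx⟩
      · rintro ⟨_, _, _, h4⟩
        apply List.all_eq_true.mpr
        intro b hb
        obtain ⟨i, hi, rfl⟩ := List.getElem_of_mem hb
        have hgd := hget i
        rw [getD_replicate_false, Bool.false_or] at hgd
        have hx : ∃ p ∈ vs, p.1 ≤ (i : Int) ∧ (i : Int) < p.2 := by
          apply h4 <;> omega
        rw [List.getD, List.getElem?_eq_getElem hi] at hgd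
        simp only [Option.getD_some] at hgd
        rw [hgd, decide_eq_true_eq]
        exact hx

theorem chain_iff (total : Int) : ∀ (a : Int) (p : Int × Int) (rest : List (Int × Int)),
    (p.1 = a ∧ ((p :: rest).getLast (by simp)).2 = total ∧ aChain (p :: rest) = true)
      ↔ ChainTo a total (p :: rest) := by
  intro a p rest
  induction rest generalizing a p with
  | nil => simp [aChain, ChainTo]
  | cons q rest ih =>
      rw [show ((p :: q :: rest).getLast (by simp)) = ((q :: rest).getLast (by simp)) from List.getLast_cons _]
      constructor
      · rintro ⟨h1, h2, h3⟩
        rw [aChain, Bool.and_eq_true, beq_iff_eq] at h3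
        exact ⟨h1, (ih p.2 q).mp ⟨h3.1.symm, h2, h3.2⟩⟩
      · rintro ⟨h1, h2⟩
        obtain ⟨a1, a2, a3⟩ := (ih p.2 q).mpr h2
        exact ⟨h1, a2, by rw [aChain, Bool.and_eq_true, beq_iff_eq]; exact ⟨a1.symm, a3⟩⟩

theorem aCheck_iff (total : Int) (vs : List (Int × Int)) (hne : vs ≠ []) :
    aCheck total vs = true ↔
      (ChainTo 0 total (PySem.List.sorted vs (fun s => s.1) false) ∧
       ∀ p ∈ PySem.List.sorted vs (fun s => s.1) false, p.1 < p.2) := by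
  unfold aCheck
  set ss := PySem.List.sorted vs (fun s => s.1) false with hss
  have hssne : ss ≠ [] := by rw [hss, ne_eq, PySem.List.sorted_eq_nil_iff]; exact hne
  obtain ⟨p, rest, hcons⟩ := List.exists_cons_of_ne_nil hssne
  rw [hcons]
  dsimp only
  rw [show PySem.List.pyGet? (p :: rest) 0 = some p by simp [PySem.List.pyGet?, PySem.List.pyIdx?]]
  rw [PySem.List.pyGet?_neg_one]
  rw [show (p :: rest).getLast? = some ((p :: rest).getLast (by simp)) from (List.getLast?_eq_some_getLast (by simp))]
  change ((if (p.1 != 0) = true then false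
    else if ((((p :: rest).getLast (by simp)).2) != total) = true then false
    else if (!aChain (p :: rest)) = true then false
    else (p :: rest).all fun q => !decide (q.2 ≤ q.1)) = true) ↔ _
  rcases eq_or_ne p.1 0 with h0 | h0
  · rw [if_neg (by simp [h0])]
    rcases eq_or_ne ((p :: rest).getLast (by simp)).2 total with hT | hT
    · rw [if_neg (by simp [hT])]
      cases hch : aChain (p :: rest) with
      | false =>
          rw [if_pos (by simp [hch])]
          simp only [Bool.false_eq_true, false_iff]
          rintro ⟨hchain, _⟩
          obtain ⟨_, _, a3⟩ := (chain_iff total 0 p rest).mpr hchain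
          rw [a3] at hch; cases hch
      | true =>
          rw [if_neg (by simp [hch])]
          simp only [List.all_eq_true, Bool.not_eq_true', decide_eq_false_iff_not, not_le]
          constructor
          · intro hall
            exact ⟨(chain_iff total 0 p rest).mp ⟨h0, hT, hch⟩, hall⟩
          · exact fun h => h.2
    · rw [if_pos (by simp [hT])]
      simp only [Bool.false_eq_true, false_iff]
      rintro ⟨hchain, _⟩
      exact hT ((chain_iff total 0 p rest).mpr hchain).2.1
  · rw [if_pos (by simp [h0])]
    simp only [Bool.false_eq_true, false_iff]
    rintro ⟨hchain, _⟩
    exact h0 hchain.1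

theorem chainTo_le {a total : Int} {ss : List (Int × Int)}
    (h : ChainTo a total ss) (hnd : ∀ p ∈ ss, p.1 < p.2) : a ≤ total := by
  induction ss generalizing a with
  | nil => exact le_of_eq h
  | cons p rest ih =>
      obtain ⟨h1, h2⟩ := h
      have := hnd p (List.mem_cons_self ..)
      have := ih h2 (fun q hq => hnd q (List.mem_cons_of_mem _ hq))
      omega

theorem chainTo_covers {a total : Int} {ss : List (Int × Int)}
    (h : ChainTo a total ss) (hnd : ∀ p ∈ ss, p.1 < p.2) :
    (∀ p ∈ ss, a ≤ p.1 ∧ p.2 ≤ total) ∧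
    List.Pairwise (fun p q : Int × Int => ∀ x : Int, p.1 ≤ x → x < p.2 → ¬(q.1 ≤ x ∧ x < q.2)) ss ∧
    (∀ x : Int, a ≤ x → x < total → ∃ p ∈ ss, p.1 ≤ x ∧ x < p.2) := by
  induction ss generalizing a with
  | nil => exact ⟨by simp, List.Pairwise.nil, fun x hx1 hx2 => by rw [h] at hx1; omega⟩
  | cons p rest ih =>
      obtain ⟨h1, h2⟩ := h
      have hndr : ∀ q ∈ rest, q.1 < q.2 := fun q hq => hnd q (List.mem_cons_of_mem _ hq)
      have hp := hnd p (List.mem_cons_self ..)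
      obtain ⟨b1, b2, b3⟩ := ih h2 hndr
      have hle : p.2 ≤ total := chainTo_le h2 hndr
      refine ⟨?_, ?_, ?_⟩
      · intro q hq
        rcases List.mem_cons.mp hq with rfl | hq'
        · omega
        · have := b1 q hq'; omega
      · refine List.Pairwise.cons ?_ b2
        intro q hq x hx1 hx2
        have := b1 q hq
        omega
      · intro x hx1 hx2
        by_cases hxe : x < p.2
        · exact ⟨p, List.mem_cons_self .., by omega, hxe⟩
        · obtain ⟨q, hq, hx⟩ := b3 x (by omega) hx2
          exact ⟨q, List.mem_cons_of_mem _ hq, hx⟩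

theorem chainTo_of_covers {a total : Int} {ss : List (Int × Int)}
    (hsorted : List.Pairwise (fun p q : Int × Int => p.1 ≤ q.1) ss)
    (hnd : ∀ p ∈ ss, p.1 < p.2)
    (hub : ∀ p ∈ ss, p.2 ≤ total)
    (hlb : ∀ p ∈ ss, a ≤ p.1)
    (hdisj : List.Pairwise (fun p q : Int × Int => ∀ x : Int, p.1 ≤ x → x < p.2 → ¬(q.1 ≤ x ∧ x < q.2)) ss)
    (hcov : ∀ x : Int, a ≤ x → x < total → ∃ p ∈ ss, p.1 ≤ x ∧ x < p.2)
    (hle : a ≤ total) : ChainTo a total ss := by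
  induction ss generalizing a with
  | nil =>
      show a = total
      by_contra hne
      obtain ⟨p, hp, _⟩ := hcov a le_rfl (by omega)
      cases hp
  | cons p rest ih =>
      obtain ⟨s, e⟩ := p
      have hse : s < e := hnd _ (List.mem_cons_self ..)
      have heT : e ≤ total := hub _ (List.mem_cons_self ..)
      have has : a ≤ s := hlb _ (List.mem_cons_self ..)
      have hsrt := List.pairwise_cons.mp hsorted
      have hdsj := List.pairwise_cons.mp hdisj
      -- first start is a
      have hsa : s = a := by
        obtain ⟨q, hq, hq1, hq2⟩ := hcov a le_rfl (by omega)
        rcases List.mem_cons.mp hq with rfl | hq'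
        · omega
        · have := hsrt.1 q hq'
          have := hlb q (List.mem_cons_of_mem _ hq')
          omega
      -- every span of rest starts at or after e
      have hrest_lb : ∀ q ∈ rest, e ≤ q.1 := by
        intro q hq
        by_contra hlt
        have hq1 : s ≤ q.1 := hsrt.1 q hq
        have hqnd := hnd q (List.mem_cons_of_mem _ hq)
        exact hdsj.1 q hq q.1 (by omega) (by omega) ⟨le_rfl, by omega⟩
      refine ⟨hsa, ?_⟩
      apply ih hsrt.2 (fun q hq => hnd q (List.mem_cons_of_mem _ hq))
        (fun q hq => hub q (List.mem_cons_of_mem _ hq)) hrest_lb hdsj.2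
      · intro x hx1 hx2
        obtain ⟨q, hq, hqx⟩ := hcov x (by omega) hx2
        rcases List.mem_cons.mp hq with rfl | hq'
        · exact absurd hqx.2 (by omega)
        · exact ⟨q, hq', hqx⟩
      · omega

theorem size_foldl_insert_ge {κ ν : Type} [BEq κ] (l : List (κ × ν)) (d : PySem.Dict κ ν) :
    d.size ≤ (List.foldl (fun acc p => acc.insert p.1 p.2) d l).size := by
  induction l generalizing d with
  | nil => exact le_rfl
  | cons p ps ih =>
      refine le_trans ?_ (ih (d.insert p.1 p.2))
      rw [PySem.Dict.size_insert]
      split <;> omega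

theorem values_ofList_ne_nil (assignments : List (String × Int × Int))
    (h : assignments ≠ []) :
    PySem.Dict.values (PySem.Dict.ofList assignments) ≠ [] := by
  intro hv
  have hitems : (PySem.Dict.ofList assignments).items = [] := List.map_eq_nil_iff.mp hv
  have hsz : (PySem.Dict.ofList assignments).size = 0 := by
    show (PySem.Dict.ofList assignments).items.length = 0
    rw [hitems]; rfl
  obtain ⟨p, ps, rfl⟩ := List.exists_cons_of_ne_nil h
  have h1 : (PySem.Dict.empty.insert p.1 p.2).size = 1 := by
    rw [PySem.Dict.size_insert]
    split
    · rename_i hc; cases hc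
    · rfl
  have := size_foldl_insert_ge ps (PySem.Dict.empty.insert p.1 p.2)
  rw [h1] at this
  have heq : PySem.Dict.ofList (p :: ps) =
      List.foldl (fun acc q => acc.insert q.1 q.2) (PySem.Dict.empty.insert p.1 p.2) ps := rfl
  rw [heq] at hsz
  omega

theorem check_eq (total : Int) (vs : List (Int × Int)) (hne : vs ≠ []) :
    aCheck total vs = bCheck total vs := by
  rw [Bool.eq_iff_iff, aCheck_iff total vs hne, bCheck_iff]
  have hperm : (PySem.List.sorted vs (fun s => s.1) false).Perm vs := PySem.List.sorted_perm vs _ _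
  have hsym : ∀ {p q : Int × Int},
      (∀ x : Int, p.1 ≤ x → x < p.2 → ¬(q.1 ≤ x ∧ x < q.2)) →
      (∀ x : Int, q.1 ≤ x → x < q.2 → ¬(p.1 ≤ x ∧ x < p.2)) :=
    fun {p q} hr x hx1 hx2 hpx => hr x hpx.1 hpx.2 ⟨hx1, hx2⟩
  unfold CoversPt
  constructor
  · rintro ⟨hchain, hnd⟩
    obtain ⟨b1, b2, b3⟩ := chainTo_covers hchain hnd
    refine ⟨?_, ?_, ?_, ?_⟩
    · intro p hp; exact hnd p (hperm.mem_iff.mpr hp)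
    · intro p hp x hx1 hx2
      have := b1 p (hperm.mem_iff.mpr hp)
      omega
    · exact (hperm.pairwise_iff hsym).mp b2
    · intro x hx1 hx2
      obtain ⟨p, hp, hx⟩ := b3 x hx1 hx2
      exact ⟨p, hperm.mem_iff.mp hp, hx⟩
  · rintro ⟨c1, c2, c3, c4⟩
    have hnd : ∀ p ∈ PySem.List.sorted vs (fun s => s.1) false, p.1 < p.2 :=
      fun p hp => c1 p (hperm.mem_iff.mp hp)
    refine ⟨?_, hnd⟩
    have hle : (0 : Int) ≤ total := by
      obtain ⟨p, ps, rfl⟩ := List.exists_cons_of_ne_nil hne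
      have h1 := c1 p (List.mem_cons_self ..)
      have h2 := c2 p (List.mem_cons_self ..) p.1 le_rfl h1
      omega
    apply chainTo_of_covers (PySem.List.sorted_pairwise vs (fun s => s.1)) hnd
    · intro p hp
      have hpv := hperm.mem_iff.mp hp
      have := c2 p hpv (p.2 - 1) (by have := c1 p hpv; omega) (by omega)
      omega
    · intro p hp
      have hpv := hperm.mem_iff.mp hp
      have := c2 p hpv p.1 le_rfl (c1 p hpv)
      omega
    · exact (hperm.pairwise_iff hsym).mpr c3
    · intro x hx1 hx2
      obtain ⟨p, hp, hx⟩ := c4 x hx1 hx2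
      exact ⟨p, hperm.mem_iff.mpr hp, hx⟩
    · exact hle

-- ===== VERDICT (by name: the statement is the Claim_ definition above) =====
theorem validate_coverage_spec : Claim_equal_validate_coverage := by
  intro assignments model_name _ _
  unfold Spec_validate_coverage validate_coverage validate_coverage_alt
  cases hm : getModelInfo? model_name with
  | none => rfl
  | some info =>
      by_cases he : assignments.isEmpty
      · simp [he]
      · simp only [he]
        exact check_eq _ _ (values_ofList_ne_nil _ (by simpa [List.isEmpty_iff] using he))
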